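-- pv_equiv track=rewrite | github.com/niconico25/comparison_of_python_code | 6_1_subtract_list.py | subtract_list_try_remove
-- ===== SOURCE A (Python) =====
-- def subtract_list_try_remove(lst1, lst2):
--     lst = lst1.copy()
--     for e2 in lst2:
--         try:
--             lst.remove(e2)
--         except ValueError:
--             continue
--     return lst
-- ===== SOURCE B (Python) =====
-- def subtract_list_try_remove(lst1, lst2):
--     # Counter-based: one pass over lst2 to tally removals, one pass over lst1
--     # skipping the first occurrences; O(n+m) instead of A's O(n*m).
--     need = {}
--     for e in lst2:
--         need[e] = need.get(e, 0) + 1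
--     out = []
--     for e in lst1:
--         k = need.get(e, 0)
--         if k:
--             need[e] = k - 1
--         else:
--             out.append(e)
--     return out
-- ===== Notes on version B (the rewrite author's own statement) =====
-- stated objective: faster
-- what changed: Replaced the per-element list.remove scan with a dict of removal counts built from lst2 followed by a single pass over lst1 that skips the first occurrences.
import Mathlib
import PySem

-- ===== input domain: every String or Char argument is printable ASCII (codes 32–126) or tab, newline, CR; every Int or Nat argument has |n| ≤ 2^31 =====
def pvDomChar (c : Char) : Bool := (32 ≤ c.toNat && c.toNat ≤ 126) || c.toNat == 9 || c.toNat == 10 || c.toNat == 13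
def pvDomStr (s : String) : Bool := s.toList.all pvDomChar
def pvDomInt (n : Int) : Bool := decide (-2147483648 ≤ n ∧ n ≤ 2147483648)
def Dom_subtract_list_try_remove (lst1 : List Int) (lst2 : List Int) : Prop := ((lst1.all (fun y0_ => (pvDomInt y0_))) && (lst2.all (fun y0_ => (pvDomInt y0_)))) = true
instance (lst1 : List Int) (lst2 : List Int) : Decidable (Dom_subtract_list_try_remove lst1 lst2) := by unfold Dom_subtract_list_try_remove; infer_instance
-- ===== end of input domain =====

-- B replaces A's repeated list.remove scans by a removal-count dict and one pass over lst1 (faster).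

-- ===== PORT A =====
def subtract_list_try_remove (lst1 : List Int) (lst2 : List Int) : List Int :=
  lst2.foldl (fun lst e2 =>
    match PySem.List.remove? lst e2 with
    | some l => l          -- lst.remove(e2) succeeded
    | none => lst)         -- ValueError: continue
    lst1

-- ===== PORT B =====
def subtract_list_try_remove_alt (lst1 : List Int) (lst2 : List Int) : List Int :=
  let need := lst2.foldl (fun d e => d.insert e (d.getD e 0 + 1)) PySem.Dict.empty
  (lst1.foldl (fun (s : PySem.Dict Int Int × List Int) e =>
      let k := s.1.getD e 0
      if k ≠ 0 then (s.1.insert e (k - 1), s.2)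
      else (s.1, s.2 ++ [e])) (need, ([] : List Int))).2

-- ===== PRECONDITION & SPEC =====
def Spec_subtract_list_try_remove (lst1 : List Int) (lst2 : List Int) (out : List Int) : Prop := out = subtract_list_try_remove_alt lst1 lst2
instance (lst1 : List Int) (lst2 : List Int) (out : List Int) : Decidable (Spec_subtract_list_try_remove lst1 lst2 out) := by unfold Spec_subtract_list_try_remove; infer_instance

-- ===== CLAIM (what is proved, stated in full; the proofs are below) =====
def Claim_equal_subtract_list_try_remove : Prop := ∀ (lst1 : List Int) (lst2 : List Int), Dom_subtract_list_try_remove lst1 lst2 → Spec_subtract_list_try_remove lst1 lst2 (subtract_list_try_remove lst1 lst2)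

-- ===== LEMMAS AND PROOFS =====

-- Common abstraction: keep the elements of the list, skipping the first `c v` occurrences of each value v.
def pvSkip : List Int → (Int → Nat) → List Int
  | [], _ => []
  | x :: xs, c =>
    if c x > 0 then pvSkip xs (fun v => if v = x then c x - 1 else c v)
    else x :: pvSkip xs c

theorem pvSkip_zero (xs : List Int) (c : Int → Nat) (h : ∀ v, c v = 0) :
    pvSkip xs c = xs := by
  induction xs with
  | nil => rfl
  | cons x xs ih => simp [pvSkip, h, ih]

-- One extra unit of budget for e = erase the first occurrence of e first.
theorem pvSkip_bump (xs : List Int) (c : Int → Nat) (e : Int) :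
    pvSkip xs (fun v => c v + if e = v then 1 else 0) = pvSkip (xs.erase e) c := by
  induction xs generalizing c with
  | nil => rfl
  | cons x xs ih =>
    by_cases hx : x = e
    · subst hx
      rw [List.erase_cons_head]
      have h2 : (fun v => if v = x then c x + 1 - 1 else c v + if x = v then 1 else 0) = c := by
        funext v; by_cases hv : v = x
        · rw [if_pos hv, hv]; omega
        · rw [if_neg hv, if_neg (fun h => hv h.symm)]; omega
      simp only [pvSkip, if_true]
      rw [if_pos (by omega : c x + 1 > 0), h2]
    · have he : (x :: xs).erase e = x :: xs.erase e :=
        List.erase_cons_tail (by simp [hx])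
      have hce : ¬ (e = x) := fun h => hx h.symm
      by_cases hc : c x > 0
      · have h2 : (fun v => if v = x then c x + 0 - 1 else c v + if e = v then 1 else 0)
            = (fun v => (if v = x then c x - 1 else c v) + if e = v then 1 else 0) := by
          funext v; by_cases hv : v = x
          · rw [if_pos hv, if_pos hv, hv, if_neg hce]; omega
          · rw [if_neg hv, if_neg hv]
        rw [he]
        simp only [pvSkip, if_neg hce]
        rw [if_pos (by omega : c x + 0 > 0), h2, ih, if_pos hc]
      · rw [he]
        simp only [pvSkip, if_neg hce]
        rw [if_neg (by omega : ¬ c x + 0 > 0), if_neg hc, ih]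

-- A computes pvSkip with the multiset of counts of lst2.
theorem portA_eq_pvSkip (lst2 lst1 : List Int) :
    subtract_list_try_remove lst1 lst2 = pvSkip lst1 (fun v => lst2.count v) := by
  induction lst2 generalizing lst1 with
  | nil =>
    rw [pvSkip_zero lst1 _ (fun v => by simp)]
    rfl
  | cons e l2 ih =>
    have hstep : (match PySem.List.remove? lst1 e with
        | some l => l | none => lst1) = lst1.erase e := by
      by_cases hm : e ∈ lst1
      · rw [PySem.List.remove?_eq_some_erase lst1 e hm]
      · rw [(PySem.List.remove?_eq_none_iff lst1 e).mpr hm, List.erase_of_not_mem hm]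
    have hA : subtract_list_try_remove lst1 (e :: l2)
        = subtract_list_try_remove (lst1.erase e) l2 := by
      simp only [subtract_list_try_remove, List.foldl_cons, hstep]
    rw [hA, ih]
    have hc : (fun v => (e :: l2).count v) = (fun v => l2.count v + if e = v then 1 else 0) := by
      funext v
      by_cases hv : v = e
      · simp [hv]
      · simp [Ne.symm hv]
    rw [hc, pvSkip_bump]

-- B's second loop computes pvSkip, given the dict carries the counts.
theorem portB_loop_eq_pvSkip (xs : List Int) (d : PySem.Dict Int Int) (c : Int → Nat)
    (out : List Int) (hd : ∀ v, d.getD v 0 = (c v : Int)) :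
    (xs.foldl (fun (s : PySem.Dict Int Int × List Int) e =>
      let k := s.1.getD e 0
      if k ≠ 0 then (s.1.insert e (k - 1), s.2)
      else (s.1, s.2 ++ [e])) (d, out)).2 = out ++ pvSkip xs c := by
  induction xs generalizing d c out with
  | nil => simp [pvSkip]
  | cons x xs ih =>
    by_cases hc : c x > 0
    · have hk : d.getD x 0 ≠ 0 := by rw [hd x]; omega
      have hd' : ∀ v, (d.insert x (d.getD x 0 - 1)).getD v 0
          = ((fun v => if v = x then c x - 1 else c v) v : Int) := by
        intro v
        rw [PySem.Dict.getD_insert]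
        by_cases hv : v = x <;> simp [hv, hd x, hd v]
        omega
      simp only [List.foldl_cons, hk, if_pos, ne_eq, not_false_eq_true]
      rw [ih _ _ _ hd']
      simp [pvSkip, hc]
    · have hc0 : c x = 0 := by omega
      have hk : ¬ (d.getD x 0 ≠ 0) := by rw [hd x, hc0]; simp
      simp only [List.foldl_cons, hk, if_neg, ne_eq, not_false_eq_true]
      rw [ih _ _ _ hd]
      simp [pvSkip, hc0]

theorem portB_eq_pvSkip (lst1 lst2 : List Int) :
    subtract_list_try_remove_alt lst1 lst2 = pvSkip lst1 (fun v => lst2.count v) := by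
  unfold subtract_list_try_remove_alt
  have hd : ∀ v, (lst2.foldl (fun d e => d.insert e (d.getD e 0 + 1)) PySem.Dict.empty).getD v 0
      = ((lst2.count v : Nat) : Int) := by
    intro v
    rw [PySem.Dict.getD_foldl_insert_add_one]
    simp [PySem.Dict.getD_empty]
  rw [portB_loop_eq_pvSkip lst1 _ (fun v => lst2.count v) [] hd]
  simp

-- ===== VERDICT (by name: the statement is the Claim_ definition above) =====
theorem subtract_list_try_remove_spec : Claim_equal_subtract_list_try_remove := by
  intro lst1 lst2 _
  unfold Spec_subtract_list_try_remove
  rw [portA_eq_pvSkip, portB_eq_pvSkip]
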